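-- pv_equiv track=rewrite | github.com/tomi1368/pycorregido | AnseLattanzioRodriguez_tp1_2.py | automata_sino
-- ===== SOURCE A (Python) =====
-- ESTADO_FINAL ="ESTADO FINAL"
--
-- ESTADO_NO_FINAL ="ESTADO NO FINAL"
--
-- ESTADO_TRAMPA = "ESTADO TRAMPA"
--
-- def automata_sino(n):
--     estado_actual = 0
--     estados_finales = [4]
--     for i in n:
--         if estado_actual == 0 and i == "s":
--             estado_actual = 1
--         elif estado_actual == 0 and i != "s":
--             estado_actual = -1
--             break
--         elif estado_actual == 1 and i == "i":
--             estado_actual = 2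
--         elif estado_actual == 1 and i != "i":
--             estado_actual = -1
--             break
--         elif estado_actual == 2 and i == "n":
--             estado_actual = 3
--         elif estado_actual == 2 and i != "n":
--             estado_actual = -1
--             break
--         elif estado_actual == 3 and i == "o":
--             estado_actual = 4
--         elif estado_actual == 3 and i != "o":
--             estado_actual = -1
--             break
--         elif estado_actual == 4 :
--             estado_actual = -1
--             break
--     if estado_actual in estados_finales:
--         return ESTADO_FINAL
--     elif estado_actual == -1:
--         return ESTADO_TRAMPA
--     else:
--         return ESTADO_NO_FINAL
-- ===== SOURCE B (Python) =====
-- ESTADO_FINAL ="ESTADO FINAL"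
--
-- ESTADO_NO_FINAL ="ESTADO NO FINAL"
--
-- ESTADO_TRAMPA = "ESTADO TRAMPA"
--
-- def automata_sino(n):
--     target = "sino"
--     if n == target:
--         return ESTADO_FINAL
--     if target.startswith(n):
--         return ESTADO_NO_FINAL
--     return ESTADO_TRAMPA
-- ===== Notes on version B (the rewrite author's own statement) =====
-- stated objective: simpler
-- what changed: The explicit five-state DFA loop is replaced by a direct prefix comparison against the target word "sino": equal -> FINAL, proper prefix -> NO FINAL, otherwise TRAMPA.
import Mathlib
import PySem

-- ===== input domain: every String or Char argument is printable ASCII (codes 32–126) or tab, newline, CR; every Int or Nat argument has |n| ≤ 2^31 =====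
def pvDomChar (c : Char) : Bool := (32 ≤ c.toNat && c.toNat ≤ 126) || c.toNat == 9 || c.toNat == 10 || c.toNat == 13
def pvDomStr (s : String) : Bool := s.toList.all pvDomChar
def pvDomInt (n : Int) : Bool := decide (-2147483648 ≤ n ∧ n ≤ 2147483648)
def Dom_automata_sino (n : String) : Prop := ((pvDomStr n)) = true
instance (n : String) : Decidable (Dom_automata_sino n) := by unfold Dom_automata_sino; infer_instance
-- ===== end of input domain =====

-- B replaces A's explicit five-state DFA loop by a direct prefix comparison against "sino" (simpler decomposition).


-- ===== PORT A =====
-- A's for-loop with break, transliterated as structural recursion on the character list;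
-- the final unmatched fall-through keeps the state and continues the loop (unreachable in practice).
def automata_sino_loop (st : Int) (cs : List Char) : Int :=
  match cs with
  | [] => st
  | c :: rest =>
    if st = 0 ∧ c = 's' then automata_sino_loop 1 rest
    else if st = 0 ∧ c ≠ 's' then -1
    else if st = 1 ∧ c = 'i' then automata_sino_loop 2 rest
    else if st = 1 ∧ c ≠ 'i' then -1
    else if st = 2 ∧ c = 'n' then automata_sino_loop 3 rest
    else if st = 2 ∧ c ≠ 'n' then -1
    else if st = 3 ∧ c = 'o' then automata_sino_loop 4 rest
    else if st = 3 ∧ c ≠ 'o' then -1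
    else if st = 4 then -1
    else automata_sino_loop st rest

def automata_sino (n : String) : String :=
  let estado_actual := automata_sino_loop 0 n.toList
  if estado_actual ∈ ([4] : List Int) then "ESTADO FINAL"
  else if estado_actual = -1 then "ESTADO TRAMPA"
  else "ESTADO NO FINAL"

-- ===== PORT B =====
def automata_sino_alt (n : String) : String :=
  if n = "sino" then "ESTADO FINAL"
  else if PySem.Str.startswith "sino" n then "ESTADO NO FINAL"
  else "ESTADO TRAMPA"

-- ===== PRECONDITION & SPEC =====
def Spec_automata_sino (n : String) (out : String) : Prop := out = automata_sino_alt n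
instance (n : String) (out : String) : Decidable (Spec_automata_sino n out) := by unfold Spec_automata_sino; infer_instance

-- ===== CLAIM (what is proved, stated in full; the proofs are below) =====
def Claim_equal_automata_sino : Prop := ∀ (n : String), Dom_automata_sino n → Spec_automata_sino n (automata_sino n)

-- ===== LEMMAS AND PROOFS =====

-- The loop from state k (0 ≤ k ≤ 4) with the rest of "sino" still to match:
-- a prefix of the remainder ends at state k + length, anything else falls in the trap.
theorem automata_sino_loop_spec (cs : List Char) : ∀ (k : ℕ), k ≤ 4 →
    automata_sino_loop (k : Int) cs =
      if cs <+: (['s','i','n','o'] : List Char).drop k then (k : Int) + cs.length else -1 := by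
  induction cs with
  | nil =>
    intro k hk
    simp [automata_sino_loop]
  | cons c rest ih =>
    intro k hk
    have h1 := ih 1 (by norm_num)
    have h2 := ih 2 (by norm_num)
    have h3 := ih 3 (by norm_num)
    have h4 := ih 4 (by norm_num)
    norm_num at h1 h2 h3 h4
    interval_cases k <;>
      simp only [automata_sino_loop, List.drop] <;>
      by_cases hc : c = 's' <;> by_cases hi : c = 'i' <;> by_cases hn : c = 'n' <;> by_cases ho : c = 'o' <;>
      simp_all [List.cons_prefix_cons] <;>
      split <;> push_cast <;> omega

-- ===== VERDICT (by name: the statement is the Claim_ definition above) =====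
theorem automata_sino_spec : Claim_equal_automata_sino := by
  intro n _
  unfold Spec_automata_sino automata_sino automata_sino_alt
  have h := automata_sino_loop_spec n.toList 0 (by norm_num)
  simp only [Nat.cast_zero, zero_add, List.drop_zero] at h
  by_cases hp : n.toList <+: (['s','i','n','o'] : List Char)
  · have hlen : n.toList.length ≤ 4 := by
      simpa using hp.length_le
    by_cases he : n = "sino"
    · subst he
      simp_all [automata_sino_loop]
    · have hne : n.toList ≠ (['s','i','n','o'] : List Char) := by
        intro habs
        apply he
        have : n.toList = ("sino" : String).toList := by simpa using habs
        exact String.toList_injective this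
      have hlt : n.toList.length < 4 := by
        rcases lt_or_eq_of_le hlen with h4 | h4
        · exact h4
        · exact absurd (hp.eq_of_length (by simpa using h4)) hne
      have hsw' : PySem.Chars.startswith ("sino".toList) n.toList = true := by
        rw [PySem.Chars.startswith_iff]
        simpa using hp
      have hlist : ("sino" : String).toList = ['s','i','n','o'] := rfl
      rw [hlist] at hsw'
      have hlen' : n.length = n.toList.length := by simp
      have hne4 : ((n.length : Int) = 4) = False := by
        simp only [hlen']; simp; omega
      simp [h, hp, he, hsw', hlist, hne4]
  · have he : n ≠ "sino" := by
      intro habs; subst habs; exact hp (by decide)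
    have hsw' : PySem.Chars.startswith ("sino".toList) n.toList = false := by
      rw [Bool.eq_false_iff]
      intro habs
      exact hp (by simpa using (PySem.Chars.startswith_iff _ _).mp habs)
    have hlist : ("sino" : String).toList = ['s','i','n','o'] := rfl
    rw [hlist] at hsw'
    simp [h, hp, he, hsw', hlist]
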